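-- pv_equiv track=rewrite | github.com/victor-geere/vxl | vxl/decoder.py | _split_imports
-- ===== SOURCE A (Python) =====
-- from typing import List, Dict, Optional, Tuple
--
-- def _split_imports(s: str) -> List[str]:
--     """Split comma-separated imports respecting braces."""
--     result = []
--     depth = 0
--     current = ""
--     for ch in s:
--         if ch == "{":
--             depth += 1
--             current += ch
--         elif ch == "}":
--             depth -= 1
--             current += ch
--         elif ch == "," and depth == 0:
--             if current.strip():
--                 result.append(current.strip())
--             current = ""
--         else:
--             current += ch
--     if current.strip():
--         result.append(current.strip())
--     return result
-- ===== SOURCE B (Python) =====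
-- def _split_imports(s):
--     """Split comma-separated imports respecting braces (two-pass: boundary indices, then slicing)."""
--     depth = 0
--     boundaries = []
--     for i, ch in enumerate(s):
--         if ch == "{":
--             depth += 1
--         elif ch == "}":
--             depth -= 1
--         elif ch == "," and depth == 0:
--             boundaries.append(i)
--     result = []
--     start = 0
--     for b in boundaries + [len(s)]:
--         seg = s[start:b].strip()
--         if seg:
--             result.append(seg)
--         start = b + 1
--     return result
-- ===== Notes on version B (the rewrite author's own statement) =====
-- stated objective: alternative
-- what changed: B replaces A's single pass with an inline string accumulator by two passes: one scan records the indices of top-level commas, a second pass slices the string at those cut points and strips/filters the pieces.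
import Mathlib
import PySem

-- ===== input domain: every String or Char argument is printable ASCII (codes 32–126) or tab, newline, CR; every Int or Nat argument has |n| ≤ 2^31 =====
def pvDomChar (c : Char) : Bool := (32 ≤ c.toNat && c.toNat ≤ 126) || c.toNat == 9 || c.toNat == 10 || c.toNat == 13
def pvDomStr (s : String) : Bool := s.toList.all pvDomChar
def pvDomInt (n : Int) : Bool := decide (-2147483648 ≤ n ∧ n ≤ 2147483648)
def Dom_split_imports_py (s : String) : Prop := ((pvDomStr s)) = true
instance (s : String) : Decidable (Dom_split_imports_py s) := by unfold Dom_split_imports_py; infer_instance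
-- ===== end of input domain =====

-- B replaces A's single pass with an inline accumulator by two passes: collect the
-- indices of top-level commas, then slice the string at those cut points (alternative
-- decomposition, same cost).

-- ===== PORT A =====
-- A's loop over the characters; state (depth, current, result); strings as List Char via PySem.Chars.
def pvAGo : List Char → Int → List Char → List String → List String
  | [], _, cur, res =>
      if PySem.Chars.strip cur ≠ [] then res ++ [String.mk (PySem.Chars.strip cur)] else res
  | c :: t, d, cur, res =>
      if c = '{' then pvAGo t (d + 1) (cur ++ [c]) res
      else if c = '}' then pvAGo t (d - 1) (cur ++ [c]) res
      else if c = ',' ∧ d = 0 then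
        pvAGo t d [] (if PySem.Chars.strip cur ≠ [] then res ++ [String.mk (PySem.Chars.strip cur)] else res)
      else pvAGo t d (cur ++ [c]) res

def split_imports_py (s : String) : List String := pvAGo s.toList 0 [] []

-- ===== PORT B =====
-- first pass: indices (always non-negative, so Nat) of commas at brace depth 0
def pvBBounds : List Char → Nat → Int → List Nat
  | [], _, _ => []
  | c :: t, i, d =>
      if c = '{' then pvBBounds t (i + 1) (d + 1)
      else if c = '}' then pvBBounds t (i + 1) (d - 1)
      else if c = ',' ∧ d = 0 then i :: pvBBounds t (i + 1) d
      else pvBBounds t (i + 1) d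

-- second pass: cut at the boundaries (s[start:b] with 0 ≤ start ≤ b ≤ len = drop/take, exact)
def pvBCut (cs : List Char) : List Nat → Nat → List String
  | [], start =>
      if PySem.Chars.strip (cs.drop start) ≠ [] then [String.mk (PySem.Chars.strip (cs.drop start))] else []
  | b :: t, start =>
      if PySem.Chars.strip ((cs.drop start).take (b - start)) ≠ [] then
        String.mk (PySem.Chars.strip ((cs.drop start).take (b - start))) :: pvBCut cs t (b + 1)
      else pvBCut cs t (b + 1)

def split_imports_py_alt (s : String) : List String := pvBCut s.toList (pvBBounds s.toList 0 0) 0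

-- ===== PRECONDITION & SPEC =====
def Spec_split_imports_py (s : String) (out : List String) : Prop := out = split_imports_py_alt s
instance (s : String) (out : List String) : Decidable (Spec_split_imports_py s out) := by unfold Spec_split_imports_py; infer_instance

-- ===== CLAIM (what is proved, stated in full; the proofs are below) =====
def Claim_equal_split_imports_py : Prop := ∀ (s : String), Dom_split_imports_py s → Spec_split_imports_py s (split_imports_py s)

-- ===== LEMMAS AND PROOFS =====

-- common abstract form: split at top-level commas, emitting stripped non-empty segments
def pvSplitTop : List Char → Int → List Char → List String
  | [], _, cur =>
      if PySem.Chars.strip cur ≠ [] then [String.mk (PySem.Chars.strip cur)] else []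
  | c :: t, d, cur =>
      if c = '{' then pvSplitTop t (d + 1) (cur ++ [c])
      else if c = '}' then pvSplitTop t (d - 1) (cur ++ [c])
      else if c = ',' ∧ d = 0 then
        (if PySem.Chars.strip cur ≠ [] then [String.mk (PySem.Chars.strip cur)] else []) ++ pvSplitTop t d []
      else pvSplitTop t d (cur ++ [c])

theorem pvAGo_eq (rest : List Char) : ∀ (d : Int) (cur : List Char) (res : List String),
    pvAGo rest d cur res = res ++ pvSplitTop rest d cur := by
  induction rest with
  | nil => intro d cur res; simp only [pvAGo, pvSplitTop]; split_ifs <;> simp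
  | cons c t ih =>
      intro d cur res
      simp only [pvAGo, pvSplitTop]
      split_ifs <;> simp [ih]

theorem pvBCut_eq (cs : List Char) : ∀ (rest : List Char) (i start : Nat) (d : Int),
    rest = cs.drop i → start ≤ i → i ≤ cs.length →
    pvBCut cs (pvBBounds rest i d) start = pvSplitTop rest d ((cs.drop start).take (i - start)) := by
  intro rest
  induction rest with
  | nil =>
      intro i start d hrest hsi hlen
      have hli : cs.length ≤ i := by
        by_contra h
        push_neg at h
        have := List.drop_eq_nil_iff.mp hrest.symm
        omega
      have htake : (cs.drop start).take (i - start) = cs.drop start := by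
        apply List.take_of_length_le
        simp; omega
      simp [pvBBounds, pvBCut, pvSplitTop, htake]
  | cons c t ih =>
      intro i start d hrest hsi hlen
      have hi : i < cs.length := by
        by_contra h
        push_neg at h
        have : cs.drop i = [] := List.drop_eq_nil_iff.mpr h
        rw [this] at hrest; simp at hrest
      have hdrop : cs.drop i = cs[i] :: cs.drop (i + 1) := List.drop_eq_getElem_cons hi
      have hc : cs[i] = c := by rw [hdrop] at hrest; exact (List.cons.injEq _ _ _ _ ▸ hrest).1.symm
      have ht : t = cs.drop (i + 1) := by rw [hdrop] at hrest; exact (List.cons.injEq _ _ _ _ ▸ hrest).2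
      have hext : (cs.drop start).take (i - start) ++ [c] = (cs.drop start).take (i + 1 - start) := by
        have h2 : start + (i - start) = i := by omega
        have hget : (cs.drop start)[i - start]? = some c := by
          rw [List.getElem?_drop, h2, List.getElem?_eq_getElem hi, hc]
        have h1 : i + 1 - start = (i - start) + 1 := by omega
        rw [h1, List.take_add_one, hget]
        rfl
      simp only [pvBBounds, pvSplitTop]
      split_ifs with h1 h2 h3 hseg
      · rw [ih (i + 1) start (d + 1) ht (by omega) (by omega), ← hext]
      · rw [ih (i + 1) start (d - 1) ht (by omega) (by omega), ← hext]
      · -- top-level comma, non-blank segment: cut here, new start = i + 1, empty current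
        have hI := ih (i + 1) (i + 1) d ht (by omega) (by omega)
        simp only [Nat.sub_self, List.take_zero] at hI
        rw [pvBCut, if_pos hseg, hI]
        simp
      · -- top-level comma, blank segment: dropped on both sides
        have hI := ih (i + 1) (i + 1) d ht (by omega) (by omega)
        simp only [Nat.sub_self, List.take_zero] at hI
        rw [pvBCut, if_neg hseg, hI]
        simp
      · rw [ih (i + 1) start d ht (by omega) (by omega), ← hext]

-- ===== VERDICT (by name: the statement is the Claim_ definition above) =====
theorem split_imports_py_spec : Claim_equal_split_imports_py := by
  intro s _
  show split_imports_py s = split_imports_py_alt s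
  unfold split_imports_py split_imports_py_alt
  rw [pvAGo_eq, pvBCut_eq s.toList s.toList 0 0 0 (by simp) (le_refl 0) (by simp)]
  simp
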